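-- pv_equiv track=rewrite | github.com/yongwangCPH/SSDraw | SSDraw/SSDraw.py | coords2path
-- ===== SOURCE A (Python) =====
-- def coords2path(coord_set1):
--
--     coords_f1 = []
--     instructions1 = []
--
--     for c in coord_set1:
--         for n in range(len(c)):
--             coords_f1.append(c[n])
--             if n == 0:
--                 instructions1.append(1)
--             else:
--                 instructions1.append(2)
--
--     return coords_f1, instructions1
-- ===== SOURCE B (Python) =====
-- def coords2path(coord_set1):
--     # Pass 1: flatten all points.
--     coords_f1 = [p for c in coord_set1 for p in c]
--     # Pass 2: record the flat offset at which each non-empty set starts.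
--     starts = set()
--     off = 0
--     for c in coord_set1:
--         if c:
--             starts.add(off)
--         off += len(c)
--     # Pass 3: an instruction is MOVETO (1) exactly at a recorded start offset.
--     instructions1 = [1 if i in starts else 2 for i in range(len(coords_f1))]
--     return coords_f1, instructions1
-- ===== Notes on version B (the rewrite author's own statement) =====
-- stated objective: alternative
-- what changed: Instead of emitting instructions point-by-point inside the flattening loop, B flattens the points in one comprehension, computes the set of flat start offsets of the non-empty coordinate sets by prefix-summing lengths, and derives each instruction from an offset-set membership test over the flat index range.
import Mathlib
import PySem

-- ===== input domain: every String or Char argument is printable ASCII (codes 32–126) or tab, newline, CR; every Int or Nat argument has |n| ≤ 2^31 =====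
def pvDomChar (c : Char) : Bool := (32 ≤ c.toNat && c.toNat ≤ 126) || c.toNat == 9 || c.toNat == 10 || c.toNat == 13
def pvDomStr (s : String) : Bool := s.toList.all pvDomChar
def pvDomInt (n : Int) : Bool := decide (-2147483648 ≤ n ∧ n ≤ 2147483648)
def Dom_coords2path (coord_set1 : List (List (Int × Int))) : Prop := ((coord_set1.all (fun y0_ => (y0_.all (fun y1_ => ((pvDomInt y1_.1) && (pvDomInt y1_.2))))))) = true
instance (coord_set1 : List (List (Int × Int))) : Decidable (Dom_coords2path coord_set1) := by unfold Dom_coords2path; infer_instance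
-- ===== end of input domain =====

-- B computes the two outputs independently: it flattens the points in one pass, computes
-- the set of flat start offsets of the non-empty sets by prefix-summing lengths, and derives
-- each instruction by an offset-set membership test over the flat index range (alternative).

-- ===== PORT A =====
def coords2path (coord_set1 : List (List (Int × Int))) : (List (Int × Int)) × List Int :=
  coord_set1.foldl (fun st c =>
    (PySem.List.pyRange 0 (PySem.List.len c) 1).foldl (fun st2 n =>
      (st2.1 ++ [PySem.List.pyGetD c n ((0 : Int), (0 : Int))],
       st2.2 ++ [if n = 0 then (1 : Int) else (2 : Int)])) st) ([], [])

-- ===== PORT B =====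
def coords2path_alt (coord_set1 : List (List (Int × Int))) : (List (Int × Int)) × List Int :=
  let coords_f1 := coord_set1.flatMap (fun c => c)
  let st := coord_set1.foldl (fun (st : PySem.Set Int × Int) c =>
      (if c = [] then st.1 else PySem.Set.add st.1 st.2, st.2 + PySem.List.len c))
      (PySem.Set.empty, 0)
  let instructions1 := (PySem.List.pyRange 0 (PySem.List.len coords_f1) 1).map
      (fun i => if PySem.Set.contains st.1 i then (1 : Int) else 2)
  (coords_f1, instructions1)

-- ===== PRECONDITION & SPEC =====
def Spec_coords2path (coord_set1 : List (List (Int × Int))) (out : (List (Int × Int)) × List Int) : Prop := out = coords2path_alt coord_set1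
instance (coord_set1 : List (List (Int × Int))) (out : (List (Int × Int)) × List Int) : Decidable (Spec_coords2path coord_set1 out) := by unfold Spec_coords2path; infer_instance

-- ===== CLAIM (what is proved, stated in full; the proofs are below) =====
def Claim_equal_coords2path : Prop := ∀ (coord_set1 : List (List (Int × Int))), Dom_coords2path coord_set1 → Spec_coords2path coord_set1 (coords2path coord_set1)

-- ===== LEMMAS AND PROOFS =====

-- common mid-level spec: both ports are proved equal to (flat points, instruction blocks)
def instrSpec (l : List (List (Int × Int))) : List Int :=
  l.flatMap (fun c => if c = [] then [] else 1 :: List.replicate (c.length - 1) (2 : Int))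

-- ---- A-side ----
def innerStep (cs : List (Int × Int)) (st2 : List (Int × Int) × List Int) (n : Int) :
    List (Int × Int) × List Int :=
  (st2.1 ++ [PySem.List.pyGetD cs n ((0 : Int), (0 : Int))],
   st2.2 ++ [if n = 0 then (1 : Int) else (2 : Int)])

theorem innerStep_eq (cs : List (Int × Int)) :
    (fun (st2 : List (Int × Int) × List Int) (n : Int) =>
      (st2.1 ++ [PySem.List.pyGetD cs n ((0 : Int), (0 : Int))],
       st2.2 ++ [if n = 0 then (1 : Int) else (2 : Int)])) = innerStep cs := rfl

theorem innerA_tail (cs : List (Int × Int)) :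
    ∀ (k : Nat) (a : Int) (st : List (Int × Int) × List Int), 1 ≤ a → a + k = cs.length →
    (PySem.List.pyRange a (cs.length : Int) 1).foldl (innerStep cs) st
      = (st.1 ++ cs.drop a.toNat, st.2 ++ List.replicate k (2 : Int)) := by
  intro k
  induction k with
  | zero =>
    intro a st h1 h2
    rw [PySem.List.pyRange_one_eq_nil (by omega)]
    simp [List.drop_of_length_le (by omega : cs.length ≤ a.toNat)]
  | succ k ih =>
    intro a st h1 h2
    have hlt : a < (cs.length : Int) := by omega
    rw [PySem.List.pyRange_one_cons hlt]
    have hn : a.toNat < cs.length := by omega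
    have hstep : innerStep cs st a
        = (st.1 ++ [(cs[a.toNat]'hn)], st.2 ++ [(2 : Int)]) := by
      unfold innerStep
      rw [PySem.List.pyGetD_eq_getElem cs (0, 0) (by omega) hlt]
      simp [show ¬ a = 0 by omega]
    rw [List.foldl_cons, hstep, ih (a + 1) _ (by omega) (by omega)]
    have hdrop : cs.drop a.toNat = (cs[a.toNat]'hn) :: cs.drop (a.toNat + 1) :=
      List.drop_eq_getElem_cons hn
    have : (a + 1).toNat = a.toNat + 1 := by omega
    rw [this, hdrop]
    simp [List.replicate_succ]

theorem innerA_eq (cs : List (Int × Int)) (st : List (Int × Int) × List Int) :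
    (PySem.List.pyRange 0 (PySem.List.len cs) 1).foldl (innerStep cs) st
      = (if cs = [] then st
         else (st.1 ++ cs, st.2 ++ (1 :: List.replicate (cs.length - 1) (2 : Int)))) := by
  rw [PySem.List.len_eq]
  by_cases hc : cs = []
  · subst hc; simp [PySem.List.pyRange_one_eq_nil]
  · have hlen : 0 < cs.length := List.length_pos_iff.mpr hc
    rw [PySem.List.pyRange_one_cons (by exact_mod_cast hlen)]
    have hstep : innerStep cs st 0 = (st.1 ++ [(cs[0]'hlen)], st.2 ++ [(1 : Int)]) := by
      unfold innerStep
      rw [PySem.List.pyGetD_eq_getElem cs (0, 0) le_rfl (by exact_mod_cast hlen)]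
      simp
    rw [List.foldl_cons, hstep,
      innerA_tail cs (cs.length - 1) (0 + 1) _ (by omega) (by omega)]
    have hdrop : cs.drop ((0 : Int) + 1).toNat = cs.tail := by
      rw [show ((0 : Int) + 1).toNat = 1 from rfl, List.drop_one]
    have hc0 : (cs[0]'hlen) :: cs.tail = cs := by
      cases cs with
      | nil => simp at hlen
      | cons x xs => rfl
    simp only [if_neg hc, hdrop, List.append_assoc,
      List.singleton_append, hc0]

-- A's fold equals the mid-level spec
theorem A_eq_spec (l : List (List (Int × Int))) :
    ∀ st : List (Int × Int) × List Int,
    l.foldl (fun st cs =>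
      (PySem.List.pyRange 0 (PySem.List.len cs) 1).foldl (innerStep cs) st) st
    = (st.1 ++ l.flatMap (fun c => c), st.2 ++ instrSpec l) := by
  induction l with
  | nil => intro st; simp [instrSpec]
  | cons cs l ih =>
    intro st
    rw [List.foldl_cons, innerA_eq]
    by_cases hc : cs = []
    · subst hc; rw [if_pos rfl, ih]; simp [instrSpec]
    · rw [if_neg hc, ih]
      simp [instrSpec, hc]

-- ---- B-side ----
def startStep (st : PySem.Set Int × Int) (c : List (Int × Int)) : PySem.Set Int × Int :=
  (if c = [] then st.1 else PySem.Set.add st.1 st.2, st.2 + PySem.List.len c)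

theorem startStep_eq :
    (fun (st : PySem.Set Int × Int) (c : List (Int × Int)) =>
      (if c = [] then st.1 else PySem.Set.add st.1 st.2, st.2 + PySem.List.len c)) = startStep := rfl

theorem set_contains_mem (s : PySem.Set Int) (i : Int) :
    (PySem.Set.contains s i = true) ↔ i ∈ s := by
  simp [PySem.Set.contains_eq_listContains]

theorem subset_foldS (l : List (List (Int × Int))) :
    ∀ (st : PySem.Set Int × Int) (x : Int), x ∈ st.1 → x ∈ (l.foldl startStep st).1 := by
  induction l with
  | nil => intro st x hx; exact hx
  | cons c l ih =>
    intro st x hx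
    rw [List.foldl_cons]
    apply ih
    unfold startStep
    by_cases hc : c = [] <;> simp [hc, PySem.Set.mem_add, hx]

-- a run of indices starting at `off`, mapped to 1 at `off` and 2 elsewhere
theorem map_run (off : Int) (n : Nat) (hn : 1 ≤ n) :
    (PySem.List.pyRange off (off + n) 1).map (fun i => if i = off then (1 : Int) else 2)
      = 1 :: List.replicate (n - 1) (2 : Int) := by
  rw [PySem.List.pyRange_one_cons (by omega)]
  rw [List.map_cons, if_pos rfl]
  congr 1
  rw [List.map_congr_left (g := fun _ => (2 : Int)) (by
    intro i hi
    rw [PySem.List.mem_pyRange_one] at hi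
    simp [show ¬ i = off by omega])]
  rw [List.map_const', PySem.List.length_pyRange_one]
  congr 1
  omega

-- main invariant of B's start-offset fold
theorem starts_spec (l : List (List (Int × Int))) :
    ∀ (S : PySem.Set Int) (off : Int), (∀ x ∈ S, x < off) →
    (l.foldl startStep (S, off)).2 = off + ((l.flatMap (fun c => c)).length : Int)
    ∧ (∀ x ∈ (l.foldl startStep (S, off)).1, x ∈ S ∨ off ≤ x)
    ∧ (PySem.List.pyRange off (off + ((l.flatMap (fun c => c)).length : Int)) 1).map
        (fun i => if PySem.Set.contains (l.foldl startStep (S, off)).1 i then (1 : Int) else 2)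
        = instrSpec l := by
  induction l with
  | nil =>
    intro S off hS
    refine ⟨by simp, fun x hx => Or.inl hx, ?_⟩
    simp [instrSpec, PySem.List.pyRange_one_eq_nil]
  | cons c l ih =>
    intro S off hS
    have hstep : startStep (S, off) c
        = ((if c = [] then S else PySem.Set.add S off), off + (c.length : Int)) := by
      unfold startStep; simp
    set S₁ := if c = [] then S else PySem.Set.add S off with hS₁def
    have hS₁ : ∀ x ∈ S₁, x < off + (c.length : Int) := by
      intro x hx
      rw [hS₁def] at hx
      by_cases hc : c = []
      · rw [if_pos hc] at hx; have := hS x hx; simp [hc]; omega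
      · rw [if_neg hc, PySem.Set.mem_add] at hx
        have hlen : 0 < c.length := List.length_pos_iff.mpr hc
        rcases hx with hx | hx
        · have := hS x hx; omega
        · omega
    obtain ⟨ih1, ih2, ih3⟩ := ih S₁ (off + (c.length : Int)) hS₁
    have hfold : (c :: l).foldl startStep (S, off) = l.foldl startStep (S₁, off + (c.length : Int)) := by
      rw [List.foldl_cons, hstep]
    have htot : (((c :: l).flatMap (fun c => c)).length : Int)
        = (c.length : Int) + ((l.flatMap (fun c => c)).length : Int) := by
      simp
    refine ⟨by rw [hfold, ih1, htot]; ring, ?_, ?_⟩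
    · intro x hx
      rw [hfold] at hx
      rcases ih2 x hx with hx1 | hx1
      · rw [hS₁def] at hx1
        by_cases hc : c = []
        · rw [if_pos hc] at hx1; exact Or.inl hx1
        · rw [if_neg hc, PySem.Set.mem_add] at hx1
          rcases hx1 with h | h
          · exact Or.inl h
          · exact Or.inr (by omega)
      · exact Or.inr (by omega)
    · rw [hfold, htot]
      rw [show off + ((c.length : Int) + ((l.flatMap (fun c => c)).length : Int))
            = (off + (c.length : Int)) + ((l.flatMap (fun c => c)).length : Int) by ring]
      rw [PySem.List.pyRange_one_append off (off + (c.length : Int)) _ (by omega)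
            (by have : (0 : Int) ≤ ((l.flatMap (fun c => c)).length : Int) := by positivity
                omega)]
      rw [List.map_append, ih3]
      by_cases hc : c = []
      · have : (c.length : Int) = 0 := by simp [hc]
        rw [this]
        simp [instrSpec, hc, PySem.List.pyRange_one_eq_nil]
      · have hlen : 0 < c.length := List.length_pos_iff.mpr hc
        have hmem : off ∈ (l.foldl startStep (S₁, off + (c.length : Int))).1 := by
          apply subset_foldS
          show off ∈ S₁
          rw [hS₁def, if_neg hc, PySem.Set.mem_add]
          exact Or.inr rfl
        rw [List.map_congr_left (g := fun i => if i = off then (1 : Int) else 2) (by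
          intro i hi
          rw [PySem.List.mem_pyRange_one] at hi
          by_cases hio : i = off
          · simp [hio, hmem]
          · simp only [if_neg hio]
            rw [if_neg]
            intro hcon
            rw [set_contains_mem] at hcon
            rcases ih2 i hcon with h | h
            · rw [hS₁def, if_neg hc, PySem.Set.mem_add] at h
              rcases h with h | h
              · have := hS i h; omega
              · exact hio h
            · omega)]
      -- the first block's run
        rw [map_run off c.length hlen]
        simp [instrSpec, hc]

-- ===== VERDICT (by name: the statement is the Claim_ definition above) =====
theorem coords2path_spec : Claim_equal_coords2path := by
  intro l _
  unfold Spec_coords2path coords2path coords2path_alt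
  simp only [innerStep_eq, startStep_eq]
  rw [A_eq_spec]
  obtain ⟨-, -, h3⟩ := starts_spec l PySem.Set.empty 0 (by intro x hx; cases hx)
  simp only [List.nil_append]
  refine Prod.ext rfl ?_
  show instrSpec l = _
  rw [← h3]
  simp [PySem.List.len_eq]
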